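-- pv_equiv track=rewrite | github.com/drewtuley/LAMBCHOP | SecurityQueue/queue_to_do.py | solution
-- ===== SOURCE A (Python) =====
-- def solution(start, length):
--
--     if start < 0 or start > 2000000000 or length < 1 or start + length > 2000000000:
--         return 0
--
--     check_length = length
--     running_checksum = 0
--     front_worker = start
--     while check_length > 0:
--         if check_length > 5:
--             repeat_blocks = int(check_length / 4)
--             jump_start = (repeat_blocks * 4) + front_worker
--             check_from_worker_idx = (repeat_blocks * 4)
--             if front_worker % 2 == 0:
--                 checksum = 0
--             else:
--                 jump_start -= 3
--                 check_from_worker_idx -= 3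
--                 checksum = front_worker
--         else:
--             jump_start = front_worker
--             checksum = 0
--             check_from_worker_idx = 0
--
--         while check_from_worker_idx < check_length:
--             checksum ^= jump_start
--             jump_start += 1
--             check_from_worker_idx += 1
--
--         front_worker += length
--         check_length -= 1
--         running_checksum ^= checksum
--     return running_checksum
-- ===== SOURCE B (Python) =====
-- def solution(start, length):
--     if start < 0 or start > 2000000000 or length < 1 or start + length > 2000000000:
--         return 0
--
--     def prefix_xor(n):
--         # XOR of all integers in [0, n), closed form by n % 4
--         r = n % 4
--         if r == 0:
--             return 0
--         if r == 1:
--             return n - 1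
--         if r == 2:
--             return 1
--         return n
--
--     total = 0
--     cl = length
--     fw = start
--     while cl > 0:
--         total ^= prefix_xor(fw + cl) ^ prefix_xor(fw)
--         fw += length
--         cl -= 1
--     return total
-- ===== Notes on version B (the rewrite author's own statement) =====
-- stated objective: faster
-- what changed: Each row's XOR of the consecutive range [fw, fw+cl) is computed in O(1) by the period-4 prefix-XOR closed form prefix_xor(fw+cl)^prefix_xor(fw), replacing A's per-row jump-ahead logic plus an inner while loop of up to 6 XOR iterations.
import Mathlib
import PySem

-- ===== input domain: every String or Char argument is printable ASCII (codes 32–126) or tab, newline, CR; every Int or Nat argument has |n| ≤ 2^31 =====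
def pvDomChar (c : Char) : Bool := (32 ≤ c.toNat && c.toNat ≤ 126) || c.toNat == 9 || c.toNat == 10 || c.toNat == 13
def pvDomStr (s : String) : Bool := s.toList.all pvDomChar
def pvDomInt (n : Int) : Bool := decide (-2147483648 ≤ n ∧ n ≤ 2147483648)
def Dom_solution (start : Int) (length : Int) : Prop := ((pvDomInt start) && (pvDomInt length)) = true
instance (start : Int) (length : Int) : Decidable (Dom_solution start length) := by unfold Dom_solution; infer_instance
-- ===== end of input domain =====

-- B replaces A's per-row jump-ahead bookkeeping + inner while loop by the closed-form
-- period-4 prefix-XOR formula for the XOR of a consecutive integer range (objective: faster).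

-- ===== PORT A =====
-- inner 'while check_from_worker_idx < check_length' loop of A
def solutionInner (jump_start check_from_worker_idx check_length checksum : Int) : Int :=
  if check_from_worker_idx < check_length then
    solutionInner (jump_start + 1) (check_from_worker_idx + 1) check_length
      (PySem.Int.bxor checksum jump_start)
  else checksum
termination_by (check_length - check_from_worker_idx).toNat
decreasing_by omega

-- outer 'while check_length > 0' loop of A
def solutionOuter (check_length running_checksum front_worker length : Int) : Int :=
  if 0 < check_length then
    let checksum :=
      if 5 < check_length then
        -- int(check_length / 4) = floor division here, since check_length > 5 > 0
        let repeat_blocks := PySem.Int.floordiv check_length 4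
        if PySem.Int.mod front_worker 2 = 0 then
          solutionInner (repeat_blocks * 4 + front_worker) (repeat_blocks * 4) check_length 0
        else
          solutionInner (repeat_blocks * 4 + front_worker - 3) (repeat_blocks * 4 - 3)
            check_length front_worker
      else
        solutionInner front_worker 0 check_length 0
    solutionOuter (check_length - 1) (PySem.Int.bxor running_checksum checksum)
      (front_worker + length) length
  else running_checksum
termination_by check_length.toNat
decreasing_by omega

def solution (start : Int) (length : Int) : Int :=
  if start < 0 ∨ 2000000000 < start ∨ length < 1 ∨ 2000000000 < start + length then 0
  else solutionOuter length 0 start length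

-- ===== PORT B =====
-- XOR of all integers in [0, n), closed form by n % 4
def prefixXor (n : Int) : Int :=
  let r := PySem.Int.mod n 4
  if r = 0 then 0 else if r = 1 then n - 1 else if r = 2 then 1 else n

-- B's 'while cl > 0' loop
def solutionAltLoop (total cl fw length : Int) : Int :=
  if 0 < cl then
    solutionAltLoop
      (PySem.Int.bxor total (PySem.Int.bxor (prefixXor (fw + cl)) (prefixXor fw)))
      (cl - 1) (fw + length) length
  else total
termination_by cl.toNat
decreasing_by omega

def solution_alt (start : Int) (length : Int) : Int :=
  if start < 0 ∨ 2000000000 < start ∨ length < 1 ∨ 2000000000 < start + length then 0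
  else solutionAltLoop 0 length start length

-- ===== PRECONDITION & SPEC =====
def Spec_solution (start : Int) (length : Int) (out : Int) : Prop := out = solution_alt start length
instance (start : Int) (length : Int) (out : Int) : Decidable (Spec_solution start length out) := by unfold Spec_solution; infer_instance

-- ===== CLAIM (what is proved, stated in full; the proofs are below) =====
def Claim_equal_solution : Prop := ∀ (start : Int) (length : Int), Dom_solution start length → Spec_solution start length (solution start length)

-- ===== LEMMAS AND PROOFS =====

-- Nat model: natF n = XOR of [0,n); natXR a n = XOR of [a, a+n)
def natF (n : Nat) : Nat :=
  if n % 4 = 0 then 0 else if n % 4 = 1 then n - 1 else if n % 4 = 2 then 1 else n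

def natXR : Nat → Nat → Nat
  | _, 0 => 0
  | a, n + 1 => a ^^^ natXR (a + 1) n

theorem xor_swap (x y z : Nat) : x ^^^ y ^^^ x ^^^ z = y ^^^ z := by
  rw [Nat.xor_comm x y, Nat.xor_assoc y x, Nat.xor_self, Nat.xor_zero]

theorem even_xor_succ (e : Nat) (he : e % 2 = 0) : e ^^^ (e + 1) = 1 := by
  rw [show e + 1 = e ^^^ 1 from (Nat.xor_one_of_even ⟨e / 2, by omega⟩).symm,
    ← Nat.xor_assoc, Nat.xor_self, Nat.zero_xor]

theorem natF_succ (n : Nat) : natF (n + 1) = natF n ^^^ n := by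
  rcases (show n % 4 = 0 ∨ n % 4 = 1 ∨ n % 4 = 2 ∨ n % 4 = 3 by omega) with h | h | h | h
  · simp [natF, h, show (n + 1) % 4 = 1 by omega]
  · obtain ⟨e, rfl⟩ : ∃ e, n = e + 1 := ⟨n - 1, by omega⟩
    simp only [natF, show (e + 1 + 1) % 4 = 2 by omega, show (e + 1) % 4 = 1 by omega]
    norm_num
    exact (even_xor_succ e (by omega)).symm
  · simp only [natF, h, show (n + 1) % 4 = 3 by omega]
    norm_num
    rw [Nat.xor_comm, Nat.xor_one_of_even ⟨n / 2, by omega⟩]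
  · simp only [natF, h, show (n + 1) % 4 = 0 by omega]
    norm_num [Nat.xor_self]

theorem natXR_eq (n a : Nat) : natXR a n = natF (a + n) ^^^ natF a := by
  induction n generalizing a with
  | zero => simp [natXR, natF, Nat.xor_self]
  | succ m ih =>
    rw [natXR, ih (a + 1), natF_succ a]
    have h1 : a + 1 + m = a + (m + 1) := by omega
    rw [h1, Nat.xor_comm (natF a) a, ← Nat.xor_assoc, ← Nat.xor_assoc]
    exact xor_swap a (natF (a + (m + 1))) (natF a)

theorem inner_eq (n : Nat) (a cs : Nat) (idx cl : Int) (h : (cl - idx).toNat = n) :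
    solutionInner (↑a) idx cl (↑cs) = ↑(cs ^^^ natXR a n) := by
  induction n generalizing a cs idx with
  | zero =>
    rw [solutionInner]
    simp only [natXR]
    rw [if_neg (by omega), Nat.xor_zero]
  | succ m ih =>
    rw [solutionInner, if_pos (by omega)]
    have h1 : (↑a : Int) + 1 = ↑(a + 1) := by omega
    have h2 : PySem.Int.bxor (↑cs) (↑a) = ↑(cs ^^^ a) := PySem.Int.bxor_natCast cs a
    rw [h2, h1, ih (a+1) (cs ^^^ a) (idx + 1) (by omega)]
    rw [natXR, ← Nat.xor_assoc]

-- A's per-row checksum equals the closed form, for a nonnegative front_worker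
theorem row_eq (fw : Nat) (cl : Int) (hcl : 0 < cl) :
    (if 5 < cl then
        let repeat_blocks := PySem.Int.floordiv cl 4
        if PySem.Int.mod (↑fw) 2 = 0 then
          solutionInner (repeat_blocks * 4 + ↑fw) (repeat_blocks * 4) cl 0
        else
          solutionInner (repeat_blocks * 4 + ↑fw - 3) (repeat_blocks * 4 - 3) cl (↑fw)
      else solutionInner (↑fw) 0 cl 0)
      = ↑(natF (fw + cl.toNat) ^^^ natF fw) := by
  have hfd : PySem.Int.floordiv cl 4 = cl / 4 := PySem.Int.floordiv_eq_ediv_of_pos (by norm_num)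
  have hfm : PySem.Int.mod (↑fw : Int) 2 = (↑fw : Int) % 2 := PySem.Int.mod_eq_emod_of_pos (by norm_num)
  by_cases h5 : 5 < cl
  · rw [if_pos h5]
    simp only [hfd, hfm]
    set rb : Int := cl / 4 with hrb
    have hrb1 : 1 ≤ rb := by omega
    have hrb4 : rb * 4 ≤ cl := by omega
    obtain ⟨m, hm⟩ : ∃ m : Nat, rb = ↑m := ⟨rb.toNat, by omega⟩
    have hm1 : 1 ≤ m := by omega
    by_cases he : (↑fw : Int) % 2 = 0
    · rw [if_pos he]
      have hcast : rb * 4 + (↑fw : Int) = ↑(fw + 4 * m) := by omega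
      have hI := inner_eq (cl - rb * 4).toNat (fw + 4 * m) 0 (rb * 4) cl rfl
      rw [show ((0 : Nat) : Int) = 0 from rfl] at hI
      rw [hcast, hI, Nat.zero_xor, natXR_eq]
      have hcnt : fw + 4 * m + (cl - rb * 4).toNat = fw + cl.toNat := by omega
      rw [hcnt]
      -- natF (fw + 4m) = natF fw since fw is even
      have hfe : fw % 2 = 0 := by omega
      have : natF (fw + 4 * m) = natF fw := by
        have h4 : (fw + 4 * m) % 4 = fw % 4 := by omega
        simp only [natF, h4]
        have : fw % 4 = 0 ∨ fw % 4 = 2 := by omega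
        rcases this with h | h <;> simp [h]
      rw [this]
    · rw [if_neg he]
      have hfo : fw % 2 = 1 := by omega
      have hcast : rb * 4 + (↑fw : Int) - 3 = ↑(fw + 4 * m - 3) := by omega
      rw [hcast, inner_eq (cl - (rb * 4 - 3)).toNat (fw + 4 * m - 3) fw (rb * 4 - 3) cl rfl,
        natXR_eq]
      have hcnt : fw + 4 * m - 3 + (cl - (rb * 4 - 3)).toNat = fw + cl.toNat := by omega
      rw [hcnt]
      -- fw ^^^ natF (fw + 4m - 3) = natF fw since fw is odd
      have key : fw ^^^ natF (fw + 4 * m - 3) = natF fw := by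
        have h4 : (fw + 4 * m - 3) % 4 = (fw + 1) % 4 := by omega
        have hor : fw % 4 = 1 ∨ fw % 4 = 3 := by omega
        rcases hor with h | h
        · have h2 : (fw + 4 * m - 3) % 4 = 2 := by omega
          simp only [natF, h2, h]
          norm_num
          exact Nat.xor_one_of_odd ⟨fw / 2, by omega⟩
        · have h0 : (fw + 4 * m - 3) % 4 = 0 := by omega
          simp only [natF, h0, h]
          norm_num
      have hfin : fw ^^^ (natF (fw + cl.toNat) ^^^ natF (fw + 4 * m - 3))
          = natF (fw + cl.toNat) ^^^ natF fw := by
        rw [← Nat.xor_assoc, Nat.xor_comm fw (natF (fw + cl.toNat)), Nat.xor_assoc, key]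
      exact congrArg _ hfin
  · rw [if_neg h5]
    have hI := inner_eq cl.toNat fw 0 0 cl (by omega)
    rw [show ((0 : Nat) : Int) = 0 from rfl] at hI
    rw [hI, Nat.zero_xor, natXR_eq]

theorem prefixXor_natCast (n : Nat) : prefixXor ↑n = ↑(natF n) := by
  have hm : PySem.Int.mod (↑n : Int) 4 = (↑n : Int) % 4 := PySem.Int.mod_eq_emod_of_pos (by norm_num)
  simp only [prefixXor, hm, natF]
  have h4 : ((↑n : Int) % 4) = ↑(n % 4) := by omega
  rcases (show n % 4 = 0 ∨ n % 4 = 1 ∨ n % 4 = 2 ∨ n % 4 = 3 by omega) with h | h | h | h  <;>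
    simp [h4, h] <;> omega

theorem outer_eq (n : Nat) (cl : Int) (hn : cl = ↑n) (fw : Nat) (r L : Int) (hL : 1 ≤ L) :
    solutionOuter cl r (↑fw) L = solutionAltLoop r cl (↑fw) L := by
  induction n generalizing cl fw r with
  | zero =>
    rw [solutionOuter, solutionAltLoop, if_neg (by omega), if_neg (by omega)]
  | succ m ih =>
    have hcl : 0 < cl := by omega
    rw [solutionOuter, solutionAltLoop, if_pos hcl, if_pos hcl]
    have hrow := row_eq fw cl hcl
    simp only at hrow
    simp only [hrow]
    have hB : PySem.Int.bxor (prefixXor (↑fw + cl)) (prefixXor ↑fw)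
        = ↑(natF (fw + cl.toNat) ^^^ natF fw) := by
      have : (↑fw : Int) + cl = ↑(fw + cl.toNat) := by omega
      rw [this, prefixXor_natCast, prefixXor_natCast]
      exact PySem.Int.bxor_natCast _ _
    rw [hB]
    have hfw' : (↑fw : Int) + L = ↑(fw + L.toNat) := by omega
    rw [hfw']
    exact ih (cl - 1) (by omega) (fw + L.toNat) _

-- ===== VERDICT (by name: the statement is the Claim_ definition above) =====
theorem solution_spec : Claim_equal_solution := by
  intro start length _
  unfold Spec_solution solution solution_alt
  by_cases hg : start < 0 ∨ 2000000000 < start ∨ length < 1 ∨ 2000000000 < start + length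
  · rw [if_pos hg, if_pos hg]
  · rw [if_neg hg, if_neg hg]
    push Not at hg
    obtain ⟨s, hs⟩ : ∃ s : Nat, start = ↑s := ⟨start.toNat, by omega⟩
    rw [hs]
    exact outer_eq length.toNat length (by omega) s 0 length (by omega)
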